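-- pv_equiv track=rewrite | github.com/HighlyTrainedNeuralNetwork/DecklistOCR | test suite/processTextFile.py | calculateDictDifference
-- ===== SOURCE A (Python) =====
-- def calculateDictDifference(dict1, dict2):
--     xorKeys = set(dict1.keys()) ^ set(dict2.keys())
--     andKeys = set(dict1.keys()) & set(dict2.keys())
--     difference = 0
--     for key in xorKeys:
--         if key in dict1.keys():
--             difference += dict1[key]
--         else:
--             difference += dict2[key]
--     for key in andKeys:
--         difference += abs(dict1[key] - dict2[key])
--     return difference
-- ===== SOURCE B (Python) =====
-- def calculateDictDifference(dict1, dict2):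
--     total = sum(dict1.values()) + sum(dict2.values())
--     for key in dict1.keys() & dict2.keys():
--         total -= 2 * min(dict1[key], dict2[key])
--     return total
-- ===== Notes on version B (the rewrite author's own statement) =====
-- stated objective: simpler
-- what changed: Replaces A's xor/and key case analysis (raw value on unique keys, abs difference on shared keys) by the identity |a-b| = a+b-2*min(a,b): sum all values of both dicts, then subtract 2*min over the shared keys only.
import Mathlib
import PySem

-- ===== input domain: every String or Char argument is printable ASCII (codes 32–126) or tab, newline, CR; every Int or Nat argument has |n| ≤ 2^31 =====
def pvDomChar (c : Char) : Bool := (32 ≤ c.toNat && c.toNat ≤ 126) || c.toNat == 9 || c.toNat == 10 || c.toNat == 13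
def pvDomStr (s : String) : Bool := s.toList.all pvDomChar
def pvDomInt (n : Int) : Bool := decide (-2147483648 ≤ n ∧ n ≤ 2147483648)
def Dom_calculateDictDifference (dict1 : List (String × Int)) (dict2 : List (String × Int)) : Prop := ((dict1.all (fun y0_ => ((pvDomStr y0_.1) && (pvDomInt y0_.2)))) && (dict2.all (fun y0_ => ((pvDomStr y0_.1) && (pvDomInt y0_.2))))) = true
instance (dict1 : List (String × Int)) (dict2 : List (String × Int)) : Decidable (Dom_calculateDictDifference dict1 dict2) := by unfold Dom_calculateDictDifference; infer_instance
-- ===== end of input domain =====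

-- B replaces A's xor/and case split by the identity |a-b| = a+b-2*min(a,b): sum all values,
-- then subtract 2*min over the shared keys only (objective: simpler; same asymptotic cost).

-- dict indexing d[k]: first-match lookup in the association list (total here: every key it is
-- applied to is present in the dict, so the default 0 is never used)
def pvGet (d : List (String × Int)) (k : String) : Int :=
  ((PySem.Dict.mk d).get? k).getD 0

-- ===== PORT A =====
def calculateDictDifference (dict1 : List (String × Int)) (dict2 : List (String × Int)) : Int :=
  let keys1 := PySem.Set.ofList (dict1.map Prod.fst)
  let keys2 := PySem.Set.ofList (dict2.map Prod.fst)
  let xorKeys := PySem.Set.symmDiff keys1 keys2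
  let andKeys := PySem.Set.inter keys1 keys2
  let difference : Int := 0
  let difference := xorKeys.foldl (fun d key =>
    if PySem.Set.contains keys1 key then d + pvGet dict1 key else d + pvGet dict2 key) difference
  andKeys.foldl (fun d key => d + |pvGet dict1 key - pvGet dict2 key|) difference

-- ===== PORT B =====
-- sum(d.values()) over the dict's distinct keys (first-match value), per the assoc-list convention
def pvValuesSum (d : List (String × Int)) : Int :=
  ((PySem.List.dedup (d.map Prod.fst)).map (pvGet d)).sum

def calculateDictDifference_alt (dict1 : List (String × Int)) (dict2 : List (String × Int)) : Int :=
  let total := pvValuesSum dict1 + pvValuesSum dict2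
  (PySem.Set.inter (PySem.Set.ofList (dict1.map Prod.fst))
      (PySem.Set.ofList (dict2.map Prod.fst))).foldl
    (fun t key => t - 2 * min (pvGet dict1 key) (pvGet dict2 key)) total

-- ===== PRECONDITION & SPEC =====
def Spec_calculateDictDifference (dict1 : List (String × Int)) (dict2 : List (String × Int)) (out : Int) : Prop := out = calculateDictDifference_alt dict1 dict2
instance (dict1 : List (String × Int)) (dict2 : List (String × Int)) (out : Int) : Decidable (Spec_calculateDictDifference dict1 dict2 out) := by unfold Spec_calculateDictDifference; infer_instance

-- ===== CLAIM (what is proved, stated in full; the proofs are below) =====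
def Claim_equal_calculateDictDifference : Prop := ∀ (dict1 : List (String × Int)) (dict2 : List (String × Int)), Dom_calculateDictDifference dict1 dict2 → Spec_calculateDictDifference dict1 dict2 (calculateDictDifference dict1 dict2)

-- ===== LEMMAS AND PROOFS =====

-- |a-b| = a + b - 2*min(a,b)
theorem pv_abs_sub (a b : Int) : |a - b| = a + b + (-(2 * min a b)) := by
  rcases le_total a b with h | h
  · rw [min_eq_left h, abs_of_nonpos (by omega)]; ring
  · rw [min_eq_right h, abs_of_nonneg (by omega)]; ring

-- the |·| column of a sum splits into the three columns of the identity
theorem pv_comb (l : List String) (g1 g2 : String → Int) :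
    (l.map (fun k => |g1 k - g2 k|)).sum
      = (l.map g1).sum + (l.map g2).sum + (l.map (fun k => -(2 * min (g1 k) (g2 k)))).sum := by
  induction l with
  | nil => simp
  | cons a t ih => simp only [List.map_cons, List.sum_cons, ih, pv_abs_sub (g1 a) (g2 a)]; ring

-- a nodup key list partitions into the part inside t and the part outside t
theorem pv_split (l : List String) (p : String → Bool) (f : String → Int) :
    ((l.filter p).map f).sum + ((l.filter (fun x => !p x)).map f).sum = (l.map f).sum := by
  have h := (List.filter_append_perm p l).map f
  calc ((l.filter p).map f).sum + ((l.filter (fun x => !p x)).map f).sum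
      = (((l.filter p).map f) ++ ((l.filter (fun x => !p x)).map f)).sum := by
        rw [List.sum_append]
    _ = (l.map f).sum := by
        rw [← List.map_append]; exact h.sum_eq

theorem pv_main (dict1 dict2 : List (String × Int)) :
    calculateDictDifference dict1 dict2 = calculateDictDifference_alt dict1 dict2 := by
  set g1 := pvGet dict1 with hg1
  set g2 := pvGet dict2 with hg2
  set K1 := PySem.Set.ofList (dict1.map Prod.fst) with hK1
  set K2 := PySem.Set.ofList (dict2.map Prod.fst) with hK2
  have n1 : K1.Nodup := PySem.Set.nodup_ofList _
  have n2 : K2.Nodup := PySem.Set.nodup_ofList _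
  -- the two folds of A as sums
  have hbody : (fun (d : Int) key =>
      if PySem.Set.contains K1 key then d + g1 key else d + g2 key)
      = fun d key => d + (if PySem.Set.contains K1 key then g1 key else g2 key) := by
    funext d key; split <;> rfl
  rw [calculateDictDifference, calculateDictDifference_alt]
  simp only [← hK1, ← hK2, ← hg1, ← hg2, hbody, PySem.List.foldl_add]
  have hBfold : (fun (t : Int) key => t - 2 * min (g1 key) (g2 key))
      = fun t key => t + (-(2 * min (g1 key) (g2 key))) := by
    funext t key; ring
  rw [hBfold, PySem.List.foldl_add]
  -- name the pieces
  have hsym : PySem.Set.symmDiff K1 K2 = K1.filter (fun x => !K2.contains x) ++ K2.filter (fun x => !K1.contains x) := rfl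
  have hint : PySem.Set.inter K1 K2 = K1.filter (fun x => K2.contains x) := rfl
  set X1 := K1.filter (fun x => !K2.contains x) with hX1
  set X2 := K2.filter (fun x => !K1.contains x) with hX2
  set I := K1.filter (fun x => K2.contains x) with hI
  rw [hsym, hint]
  -- on X1 the branch picks g1, on X2 it picks g2
  have hmX1 : X1.map (fun key => if PySem.Set.contains K1 key then g1 key else g2 key) = X1.map g1 := by
    refine List.map_congr_left (fun k hk => ?_)
    have hk1 : k ∈ K1 := (List.mem_filter.mp hk).1
    rw [if_pos (by simpa using (PySem.Set.contains_iff K1 k).mpr hk1)]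
  have hmX2 : X2.map (fun key => if PySem.Set.contains K1 key then g1 key else g2 key) = X2.map g2 := by
    refine List.map_congr_left (fun k hk => ?_)
    have hk1 := (List.mem_filter.mp hk).2
    rw [if_neg (by simpa using hk1)]
  -- partitions of K1 and K2
  have hP1 : (I.map g1).sum + (X1.map g1).sum = ((K1 : List String).map g1).sum :=
    pv_split K1 (fun x => K2.contains x) g1
  have hP2 : ((K2.filter (fun x => K1.contains x)).map g2).sum + (X2.map g2).sum
      = ((K2 : List String).map g2).sum :=
    pv_split K2 (fun x => K1.contains x) g2
  -- K2 ∩ K1 is a permutation of I = K1 ∩ K2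
  have hperm : (K2.filter (fun x => K1.contains x)).Perm I := by
    refine (List.perm_ext_iff_of_nodup (n2.filter _) (n1.filter _)).mpr (fun a => ?_)
    simp only [List.mem_filter]
    constructor
    · rintro ⟨h2, h1⟩; exact ⟨by simpa using h1, by simpa using (PySem.Set.contains_iff K2 a).mpr h2⟩
    · rintro ⟨h1, h2⟩; exact ⟨by simpa using h2, by simpa using (PySem.Set.contains_iff K1 a).mpr h1⟩
  have hI2 : ((K2.filter (fun x => K1.contains x)).map g2).sum = (I.map g2).sum :=
    (hperm.map g2).sum_eq
  -- values sums
  have hV1 : pvValuesSum dict1 = ((K1 : List String).map g1).sum := by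
    rw [pvValuesSum, PySem.List.dedup_eq_ofList, ← hK1, ← hg1]
  have hV2 : pvValuesSum dict2 = ((K2 : List String).map g2).sum := by
    rw [pvValuesSum, PySem.List.dedup_eq_ofList, ← hK2, ← hg2]
  rw [List.map_append, List.sum_append, hmX1, hmX2, hV1, hV2]
  have hC := pv_comb I g1 g2
  -- assemble
  linarith [hP1, hP2, hI2, hC]

-- ===== VERDICT (by name: the statement is the Claim_ definition above) =====
theorem calculateDictDifference_spec : Claim_equal_calculateDictDifference := by
  intro dict1 dict2 _
  exact pv_main dict1 dict2
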